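-- pv_equiv track=rewrite | github.com/erichaase/topcoder-python | topcoder/triangle_construction.py | solution
-- ===== SOURCE A (Python) =====
-- import itertools
--
-- def solution (lengths):
--     max = -1
--     # iterate through all of the diff combinations of sticks
--     for triangle in itertools.combinations(lengths, 3):
--         x, y, z = sorted(triangle)
--         if not x + y > z:
--             continue
--         s = sum(triangle)
--         if s > max:
--             max = s
--     return max
-- ===== SOURCE B (Python) =====
-- def solution(lengths):
--     s = sorted(lengths)
--     best = -1
--     for a, b, c in zip(s, s[1:], s[2:]):
--         if a + b > c and a + b + c > best:
--             best = a + b + c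
--     return best
-- ===== Notes on version B (the rewrite author's own statement) =====
-- stated objective: faster
-- what changed: Replaces the O(n^3) scan of all 3-combinations with sort-once then a single pass over consecutive triples of the sorted list (a valid triangle of maximal perimeter always appears as a consecutive sorted triple).
import Mathlib
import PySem

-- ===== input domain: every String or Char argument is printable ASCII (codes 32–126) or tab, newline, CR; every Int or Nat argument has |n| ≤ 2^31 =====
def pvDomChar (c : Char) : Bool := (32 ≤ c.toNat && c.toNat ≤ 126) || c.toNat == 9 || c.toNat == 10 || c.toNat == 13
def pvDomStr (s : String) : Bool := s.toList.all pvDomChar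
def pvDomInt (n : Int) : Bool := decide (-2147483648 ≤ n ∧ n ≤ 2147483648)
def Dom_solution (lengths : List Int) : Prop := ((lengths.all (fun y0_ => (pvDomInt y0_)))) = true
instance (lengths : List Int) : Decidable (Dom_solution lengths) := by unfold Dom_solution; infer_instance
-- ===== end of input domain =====

-- B replaces A's O(n^3) scan of all 3-combinations by sort-once + one pass over consecutive
-- sorted triples (the maximal valid perimeter always occurs at a consecutive sorted triple).

-- ===== PORT A =====
def solution (lengths : List Int) : Int :=
  (PySem.List.combinations lengths 3).foldl
    (fun best tri =>
      match PySem.List.sorted tri (fun x => x) with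
      | [x, y, z] =>
        if ¬ (x + y > z) then best
        else
          let s := tri.sum
          if s > best then s else best
      | _ => best)
    (-1)

-- ===== PORT B =====
def solution_alt (lengths : List Int) : Int :=
  let s := PySem.List.sorted lengths (fun x => x)
  (s.zip ((PySem.List.slice s (some 1) none).zip (PySem.List.slice s (some 2) none))).foldl
    (fun best t =>
      if t.1 + t.2.1 > t.2.2 ∧ t.1 + t.2.1 + t.2.2 > best then t.1 + t.2.1 + t.2.2 else best)
    (-1)

-- ===== PRECONDITION & SPEC =====
def Spec_solution (lengths : List Int) (out : Int) : Prop := out = solution_alt lengths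
instance (lengths : List Int) (out : Int) : Decidable (Spec_solution lengths out) := by unfold Spec_solution; infer_instance

-- ===== CLAIM (what is proved, stated in full; the proofs are below) =====
def Claim_equal_solution : Prop := ∀ (lengths : List Int), Dom_solution lengths → Spec_solution lengths (solution lengths)

-- ===== LEMMAS AND PROOFS =====

-- A's candidate extractor: the perimeter a combination contributes, if it is a valid triangle.
def gA (tri : List Int) : Option Int :=
  match PySem.List.sorted tri (fun x => x) with
  | [x, y, z] => if x + y > z then some tri.sum else none
  | _ => none

-- B's candidate extractor over consecutive triples.
def gB (t : Int × Int × Int) : Option Int :=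
  if t.1 + t.2.1 > t.2.2 then some (t.1 + t.2.1 + t.2.2) else none

-- B's list of consecutive triples.
def Ztr (s : List Int) : List (Int × Int × Int) := s.zip ((s.drop 1).zip (s.drop 2))

theorem getIdx_congr {α : Type} (l : List α) {i j : ℕ} (h : i = j) {hi : i < l.length}
    {hj : j < l.length} : l[i]'hi = l[j]'hj := by subst h; rfl

-- Both loops are a fold of max over the extracted candidates.
theorem foldl_opt_max {α : Type} (g : α → Option Int) (f : Int → α → Int)
    (hf : ∀ b x, f b x = match g x with | some v => max b v | none => b) :
    ∀ (L : List α) (i : Int), L.foldl f i = (L.filterMap g).foldl max i := by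
  intro L
  induction L with
  | nil => intro i; rfl
  | cons x L ih =>
    intro i
    rw [List.foldl_cons, hf, List.filterMap_cons]
    cases g x <;> simp [ih]

theorem solution_eq_fold (lengths : List Int) :
    solution lengths = ((PySem.List.combinations lengths 3).filterMap gA).foldl max (-1) := by
  unfold solution
  apply foldl_opt_max
  intro b tri
  unfold gA
  rcases h : PySem.List.sorted tri (fun x => x) with _ | ⟨x, _ | ⟨y, _ | ⟨z, _ | ⟨w, rest⟩⟩⟩⟩
  all_goals first
    | rfl
    | (dsimp only; split_ifs <;> (try simp) <;> omega)

theorem solution_alt_eq_fold (lengths : List Int) :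
    solution_alt lengths =
      ((Ztr (PySem.List.sorted lengths (fun x => x))).filterMap gB).foldl max (-1) := by
  unfold solution_alt Ztr
  dsimp only
  rw [PySem.List.slice_from_one, PySem.List.slice_from _ (by norm_num : (0:Int) ≤ 2)]
  have h1 : (PySem.List.sorted lengths (fun x => x)).tail
      = (PySem.List.sorted lengths (fun x => x)).drop 1 := List.drop_one.symm
  have h2 : ((2:Int)).toNat = 2 := rfl
  rw [h1, h2]
  apply foldl_opt_max
  intro b t
  rcases t with ⟨a, b2, c⟩
  unfold gB
  dsimp only
  split_ifs <;> (try simp) <;> omega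

theorem foldl_max_le (L : List Int) : ∀ (i x : Int), i ≤ x → (∀ v ∈ L, v ≤ x) → L.foldl max i ≤ x := by
  induction L with
  | nil => intro i x hi _; simpa using hi
  | cons a L ih =>
    intro i x hi h
    rw [List.foldl_cons]
    exact ih _ _ (by have := h a (by simp); omega) (fun v hv => h v (by simp [hv]))

theorem le_foldl_max (L : List Int) : ∀ (i : Int), i ≤ L.foldl max i := by
  induction L with
  | nil => intro i; simp
  | cons a L ih => intro i; rw [List.foldl_cons]; exact le_trans (le_max_left _ _) (ih _)

theorem mem_le_foldl_max (L : List Int) : ∀ (i v : Int), v ∈ L → v ≤ L.foldl max i := by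
  induction L with
  | nil => intro i v hv; simp at hv
  | cons a L ih =>
    intro i v hv
    rw [List.foldl_cons]
    rcases List.mem_cons.mp hv with h | h
    · subst h; exact le_trans (le_max_right _ _) (le_foldl_max _ _)
    · exact ih _ _ h

theorem foldl_max_eq_of_dom (L1 L2 : List Int) (i : Int)
    (h12 : ∀ v ∈ L1, ∃ w ∈ L2, v ≤ w) (h21 : ∀ w ∈ L2, ∃ v ∈ L1, w ≤ v) :
    L1.foldl max i = L2.foldl max i := by
  apply le_antisymm
  · refine foldl_max_le _ _ _ (le_foldl_max _ _) ?_
    intro v hv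
    obtain ⟨w, hw, hvw⟩ := h12 v hv
    exact le_trans hvw (mem_le_foldl_max _ _ _ hw)
  · refine foldl_max_le _ _ _ (le_foldl_max _ _) ?_
    intro w hw
    obtain ⟨v, hv, hwv⟩ := h21 w hw
    exact le_trans hwv (mem_le_foldl_max _ _ _ hv)

theorem Ztr_length (s : List Int) : (Ztr s).length = s.length - 2 := by
  simp [Ztr]; omega

theorem Ztr_getElem (s : List Int) (i : ℕ) (h : i + 2 < s.length) (hz : i < (Ztr s).length) :
    (Ztr s)[i] = (s[i]'(by omega), s[i+1]'(by omega), s[i+2]'(by omega)) := by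
  unfold Ztr at hz ⊢
  rw [List.getElem_zip, List.getElem_zip, List.getElem_drop, List.getElem_drop]
  refine congrArg₂ Prod.mk rfl (congrArg₂ Prod.mk ?_ ?_)
  · exact getIdx_congr s (by omega)
  · exact getIdx_congr s (by omega)

-- a consecutive triple of s is a sublist of s
theorem adj_sublist (s : List Int) (i : ℕ) (h : i + 2 < s.length) :
    [s[i]'(by omega), s[i+1]'(by omega), s[i+2]'(by omega)].Sublist s := by
  have h1 : (s.drop i).take 3 = [s[i]'(by omega), s[i+1]'(by omega), s[i+2]'(by omega)] := by
    rw [List.drop_eq_getElem_cons (by omega : i < s.length)]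
    rw [List.drop_eq_getElem_cons (by omega : i + 1 < s.length)]
    rw [List.drop_eq_getElem_cons (by omega : i + 2 < s.length)]
    rfl
  rw [← h1]
  exact (List.take_sublist _ _).trans (List.drop_sublist _ _)

-- any valid sorted triple that is a sublist of the sorted list is dominated by a consecutive triple
theorem exists_dominating (lengths : List Int) (x y z : Int)
    (hsub : [x, y, z].Sublist (PySem.List.sorted lengths (fun x => x)))
    (hval : x + y > z) :
    ∃ w ∈ (Ztr (PySem.List.sorted lengths (fun x => x))).filterMap gB, x + y + z ≤ w := by
  set s := PySem.List.sorted lengths (fun x => x) with hs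
  obtain ⟨f, hf⟩ := List.sublist_iff_exists_fin_orderEmbedding_get_eq.mp hsub
  have h0 : (0 : ℕ) < ([x, y, z] : List Int).length := by simp
  have h1 : (1 : ℕ) < ([x, y, z] : List Int).length := by simp
  have h2 : (2 : ℕ) < ([x, y, z] : List Int).length := by simp
  set i := (f ⟨0, h0⟩ : Fin s.length) with hi
  set j := (f ⟨1, h1⟩ : Fin s.length) with hj
  set k := (f ⟨2, h2⟩ : Fin s.length) with hk
  have hij : (i : ℕ) < j := f.strictMono (by simp)
  have hjk : (j : ℕ) < k := f.strictMono (by simp)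
  have hkl : (k : ℕ) < s.length := k.isLt
  have hx : x = s[(i : ℕ)] := by have := hf ⟨0, h0⟩; simpa [List.get] using this
  have hy : y = s[(j : ℕ)] := by have := hf ⟨1, h1⟩; simpa [List.get] using this
  have hz : z = s[(k : ℕ)] := by have := hf ⟨2, h2⟩; simpa [List.get] using this
  have hk2 : 2 ≤ (k : ℕ) := by omega
  have hzlen : (k : ℕ) - 2 < (Ztr s).length := by rw [Ztr_length]; omega
  have hsl : (PySem.List.sorted lengths fun x => x).length = s.length := by rw [hs]
  have htrip : (Ztr s)[(k : ℕ) - 2] =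
      (s[(k : ℕ) - 2]'(by omega), s[(k : ℕ) - 1]'(by omega), s[(k : ℕ)]'(by omega)) := by
    rw [Ztr_getElem s ((k : ℕ) - 2) (by omega) hzlen]
    refine congrArg₂ Prod.mk rfl (congrArg₂ Prod.mk ?_ ?_)
    · exact getIdx_congr s (by omega)
    · exact getIdx_congr s (by omega)
  have ha : s[(i : ℕ)]'(by omega) ≤ s[(k : ℕ) - 2]'(by omega) :=
    PySem.List.sorted_id_getElem_mono lengths (by omega) (by omega)
  have hb : s[(j : ℕ)]'(by omega) ≤ s[(k : ℕ) - 1]'(by omega) :=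
    PySem.List.sorted_id_getElem_mono lengths (by omega) (by omega)
  refine ⟨s[(k : ℕ) - 2]'(by omega) + s[(k : ℕ) - 1]'(by omega) + s[(k : ℕ)]'(by omega), ?_, by omega⟩
  apply List.mem_filterMap.mpr
  refine ⟨(s[(k : ℕ) - 2]'(by omega), s[(k : ℕ) - 1]'(by omega), s[(k : ℕ)]'(by omega)), ?_, ?_⟩
  · rw [← htrip]; exact List.getElem_mem hzlen
  · unfold gB
    dsimp only
    rw [if_pos (by omega)]

theorem solution_spec_aux (lengths : List Int) : solution lengths = solution_alt lengths := by
  rw [solution_eq_fold, solution_alt_eq_fold]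
  set s := PySem.List.sorted lengths (fun x => x) with hs
  have hperm : s.Perm lengths := PySem.List.sorted_perm lengths (fun x => x) false
  have hpair : s.Pairwise (fun a b => a ≤ b) := PySem.List.sorted_pairwise lengths (fun x => x)
  apply foldl_max_eq_of_dom
  · -- every valid combination is dominated by a consecutive sorted triple
    intro v hv
    obtain ⟨tri, htri, hg⟩ := List.mem_filterMap.mp hv
    obtain ⟨hsubl, hlen3⟩ := (PySem.List.mem_combinations_iff lengths 3 tri).mp htri
    unfold gA at hg
    rcases hsort : PySem.List.sorted tri (fun x => x) with _ | ⟨x, _ | ⟨y, _ | ⟨z, _ | ⟨w4, rest⟩⟩⟩⟩ <;>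
      rw [hsort] at hg <;> dsimp only at hg
    · exact absurd hg (by simp)
    · exact absurd hg (by simp)
    · exact absurd hg (by simp)
    · by_cases hval : x + y > z
      · rw [if_pos hval] at hg
        have hv' : v = tri.sum := by injection hg with h; omega
        have hptri : ([x, y, z] : List Int).Perm tri := by
          rw [← hsort]; exact PySem.List.sorted_perm tri (fun x => x) false
        have hsum : tri.sum = x + y + z := by
          have := hptri.sum_eq; simp at this; omega
        have hxyzpair : ([x, y, z] : List Int).Pairwise (fun a b => a ≤ b) := by
          rw [← hsort]; exact PySem.List.sorted_pairwise tri (fun x => x)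
        have hsp : ([x, y, z] : List Int).Subperm s :=
          List.Subperm.trans ⟨tri, hptri.symm, hsubl⟩ hperm.symm.subperm
        have hsubs : ([x, y, z] : List Int).Sublist s :=
          List.sublist_of_subperm_of_pairwise hsp hxyzpair hpair
        obtain ⟨w, hw, hle⟩ := exists_dominating lengths x y z hsubs hval
        exact ⟨w, hw, by omega⟩
      · rw [if_neg hval] at hg; exact absurd hg (by simp)
    · exact absurd hg (by simp)
  · -- every consecutive sorted triple candidate is itself produced by A
    intro w hw
    obtain ⟨t, ht, hg⟩ := List.mem_filterMap.mp hw
    obtain ⟨idx, hidx, hteq⟩ := List.getElem_of_mem ht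
    have hidx2 : idx + 2 < s.length := by
      have := Ztr_length s; omega
    rw [Ztr_getElem s idx hidx2 hidx] at hteq
    unfold gB at hg
    rw [← hteq] at hg
    dsimp only at hg
    by_cases hval : s[idx]'(by omega) + s[idx+1]'(by omega) > s[idx+2]'(by omega)
    · rw [if_pos hval] at hg
      have hw' : w = s[idx]'(by omega) + s[idx+1]'(by omega) + s[idx+2]'(by omega) := by
        injection hg with h; omega
      have hsubs : ([s[idx]'(by omega), s[idx+1]'(by omega), s[idx+2]'(by omega)] : List Int).Sublist s :=
        adj_sublist s idx hidx2
      have hsp : ([s[idx]'(by omega), s[idx+1]'(by omega), s[idx+2]'(by omega)] : List Int).Subperm lengths :=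
        List.Subperm.trans hsubs.subperm hperm.subperm
      obtain ⟨tri, hptri, hsubl⟩ := hsp
      have hlen3 : tri.length = 3 := by
        have := hptri.length_eq; simpa using this
      have habcpair : ([s[idx]'(by omega), s[idx+1]'(by omega), s[idx+2]'(by omega)] : List Int).Pairwise
          (fun a b => a ≤ b) := hpair.sublist hsubs
      have hsort : PySem.List.sorted tri (fun x => x)
          = [s[idx]'(by omega), s[idx+1]'(by omega), s[idx+2]'(by omega)] := by
        have heq : (PySem.List.sorted tri (fun x => x)) =
            PySem.List.sorted [s[idx]'(by omega), s[idx+1]'(by omega), s[idx+2]'(by omega)] (fun x => x) :=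
          (PySem.List.sorted_id_eq_sorted_id_iff_perm tri _).mpr hptri
        rw [heq, PySem.List.sorted_eq_self_of_pairwise _ _ habcpair]
      refine ⟨tri.sum, ?_, ?_⟩
      · apply List.mem_filterMap.mpr
        refine ⟨tri, (PySem.List.mem_combinations_iff lengths 3 tri).mpr ⟨hsubl, hlen3⟩, ?_⟩
        unfold gA
        rw [hsort]
        dsimp only
        rw [if_pos hval]
      · have := hptri.sum_eq; simp at this; omega
    · rw [if_neg hval] at hg
      exact absurd hg (by simp)

-- ===== VERDICT (by name: the statement is the Claim_ definition above) =====
theorem solution_spec : Claim_equal_solution := by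
  intro lengths _
  unfold Spec_solution
  exact solution_spec_aux lengths
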